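-- pv_equiv track=rewrite | github.com/merab235/algorithms-and-data-structures | lab3/task6/src/task6.py | sort_integer_nums
-- ===== SOURCE A (Python) =====
-- def sort_integer_nums(arr_a, arr_b):
--     arr = [i*j for i in arr_a for j in arr_b]
--     cnt_s_a = [0]*40001
--
--     for i in arr:
--         cnt_s_a[i] += 1
--     sorted_arr = []
--     for i in range(len(cnt_s_a)):
--         if cnt_s_a[i] != 0:
--             sorted_arr.extend([i]*cnt_s_a[i])
--     sm = sum(sorted_arr[i] for i in range(0, len(sorted_arr), 10))
--     return sm
-- ===== SOURCE B (Python) =====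
-- def sort_integer_nums(arr_a, arr_b):
--     cnt = [0] * 40001
--     for i in arr_a:
--         for j in arr_b:
--             cnt[i * j] += 1
--     sm = 0
--     skip = 0  # distance from the current position to the next index the 10-stride picks
--     for v, c in enumerate(cnt):
--         if c > skip:
--             sm += v * ((c - skip - 1) // 10 + 1)
--             skip = (skip - c) % 10
--         else:
--             skip -= c
--     return sm
-- ===== Notes on version B (the rewrite author's own statement) =====
-- stated objective: alternative
-- what changed: B never materialises the product list or the sorted list: it counts products directly inside nested loops and then, in a single pass over the count buckets with a running skip counter, adds each bucket value times a closed-form count of stride-10 hits inside its run.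
import Mathlib
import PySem

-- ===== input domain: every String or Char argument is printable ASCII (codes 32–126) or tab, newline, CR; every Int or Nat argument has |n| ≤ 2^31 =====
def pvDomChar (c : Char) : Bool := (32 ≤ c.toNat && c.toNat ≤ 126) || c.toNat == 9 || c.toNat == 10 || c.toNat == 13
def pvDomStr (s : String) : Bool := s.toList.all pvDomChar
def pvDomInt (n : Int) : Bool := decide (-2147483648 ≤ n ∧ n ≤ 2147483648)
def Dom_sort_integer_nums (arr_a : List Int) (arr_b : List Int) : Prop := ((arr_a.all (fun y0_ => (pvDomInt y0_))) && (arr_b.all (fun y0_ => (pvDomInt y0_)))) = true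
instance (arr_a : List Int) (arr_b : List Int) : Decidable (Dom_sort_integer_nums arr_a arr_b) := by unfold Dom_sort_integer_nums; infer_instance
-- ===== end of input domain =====

-- B counts products directly inside nested loops (no intermediate product list) and never
-- materialises the sorted list: one enumerate pass over the count buckets with a running
-- skip counter adds each bucket's closed-form stride contribution
-- (objective: alternative decomposition, same cost).

-- ===== PORT A =====
-- A's count list is represented as a Lean Array (O(1) get/set, matching CPython's
-- array-backed list); reads/writes use Python's negative-index rule, exact for
-- -len(c) ≤ i < len(c); Pre_ excludes the IndexError cases outside that range.
def pyAGetD (c : Array Int) (i : Int) (d : Int) : Int :=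
  let j : Int := if i < 0 then i + c.size else i
  if 0 ≤ j then c.getD j.toNat d else d

def pyAIncr (c : Array Int) (i : Int) : Array Int :=
  let j : Int := if i < 0 then i + c.size else i
  c.setIfInBounds j.toNat (pyAGetD c i 0 + 1)

def sort_integer_nums (arr_a : List Int) (arr_b : List Int) : Int :=
  let arr := arr_a.flatMap (fun i => arr_b.map (fun j => i * j))
  let cnt_s_a := arr.foldl (fun c i => pyAIncr c i) (Array.replicate 40001 (0 : Int))
  let sorted_arr :=
    (PySem.List.pyRange 0 (cnt_s_a.size : Int) 1).foldl
      (fun acc i =>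
        if pyAGetD cnt_s_a i 0 ≠ 0 then
          acc ++ List.replicate (pyAGetD cnt_s_a i 0).toNat i
        else acc) []
  ((PySem.List.pyRange 0 (sorted_arr.length : Int) 10).map
      (fun i => PySem.List.pyGetD sorted_arr i 0)).sum

-- ===== PORT B =====
-- B's count list stays a Lean List; `cnt[i*j] += 1` is this set with Python's
-- negative-index rule, exact for -len(c) ≤ i < len(c) (Pre_ excludes the rest).
def pyListIncr (c : List Int) (i : Int) : List Int :=
  let j : Int := if i < 0 then i + c.length else i
  c.set j.toNat (PySem.List.pyGetD c i 0 + 1)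

def sort_integer_nums_alt (arr_a : List Int) (arr_b : List Int) : Int :=
  let cnt := arr_a.foldl
      (fun c i => arr_b.foldl (fun c' j => pyListIncr c' (i * j)) c)
      (List.replicate 40001 (0 : Int))
  -- `for v, c in enumerate(cnt)` as a tail-recursive fold whose state carries
  -- the running (sum, skip, index) triple
  let r := cnt.foldl
      (fun (st : Int × Int × Int) c =>
        if c > st.2.1 then
          (st.1 + st.2.2 * (PySem.Int.floordiv (c - st.2.1 - 1) 10 + 1),
           PySem.Int.mod (st.2.1 - c) 10, st.2.2 + 1)
        else (st.1, st.2.1 - c, st.2.2 + 1)) ((0 : Int), (0 : Int), (0 : Int))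
  r.1

-- ===== PRECONDITION & SPEC =====
-- Pre_ excludes exactly the inputs where some product x*y lies outside [-40001, 40000]:
-- there `cnt[x*y] += 1` raises IndexError in A (and identically in B).
def Pre_sort_integer_nums (arr_a : List Int) (arr_b : List Int) : Prop :=
  ∀ x ∈ arr_a, ∀ y ∈ arr_b, -40001 ≤ x * y ∧ x * y ≤ 40000
instance (arr_a : List Int) (arr_b : List Int) : Decidable (Pre_sort_integer_nums arr_a arr_b) := by unfold Pre_sort_integer_nums; infer_instance
def pvWitness_sort_integer_nums : List Int × List Int := ([3, -1, 200], [5, 0, 7])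

def Spec_sort_integer_nums (arr_a : List Int) (arr_b : List Int) (out : Int) : Prop := out = sort_integer_nums_alt arr_a arr_b
instance (arr_a : List Int) (arr_b : List Int) (out : Int) : Decidable (Spec_sort_integer_nums arr_a arr_b out) := by unfold Spec_sort_integer_nums; infer_instance

-- ===== CLAIM (what is proved, stated in full; the proofs are below) =====
def Claim_equal_sort_integer_nums : Prop := ∀ (arr_a : List Int) (arr_b : List Int), Dom_sort_integer_nums arr_a arr_b → Pre_sort_integer_nums arr_a arr_b → Spec_sort_integer_nums arr_a arr_b (sort_integer_nums arr_a arr_b)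

-- ===== LEMMAS AND PROOFS =====

-- the value of the 10-stride sum, as a structural recursion:
-- `pick k l` sums the elements of l at positions k, k+10, k+20, …
def pick : Nat → List Int → Int
  | _, [] => 0
  | 0, x :: xs => x + pick 9 xs
  | k + 1, _ :: xs => pick k xs

-- number of stride hits in a run of length c entered with skip k, and the skip after it
def hits (k c : Nat) : Nat := if k < c then (c - 1 - k) / 10 + 1 else 0
def nskip (k c : Nat) : Nat := if k < c then k + 10 * ((c - 1 - k) / 10 + 1) - c else k - c

lemma pick_replicate (c : Nat) (v : Int) : ∀ (k : Nat) (rest : List Int),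
    pick k (List.replicate c v ++ rest) = v * (hits k c : Int) + pick (nskip k c) rest := by
  induction c with
  | zero => intro k rest; simp [hits, nskip]
  | succ c ih =>
    intro k rest
    rw [List.replicate_succ, List.cons_append]
    match k with
    | 0 =>
      show v + pick 9 (List.replicate c v ++ rest) = _
      rw [ih 9 rest]
      have h1 : (hits 0 (c+1) : Int) = 1 + (hits 9 c : Int) := by
        unfold hits; split_ifs <;> push_cast <;> omega
      have h2 : nskip 0 (c+1) = nskip 9 c := by unfold nskip; split_ifs; omega; omega; omega; omega
      rw [h1, h2]; ring
    | k + 1 =>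
      show pick k (List.replicate c v ++ rest) = _
      rw [ih k rest]
      have h1 : hits (k+1) (c+1) = hits k c := by unfold hits; split_ifs <;> omega
      have h2 : nskip (k+1) (c+1) = nskip k c := by unfold nskip; split_ifs <;> omega
      rw [h1, h2]

lemma pick_eq_drop : ∀ (xs : List Int) (k : Nat), pick k xs = pick 0 (xs.drop k) := by
  intro xs
  induction xs with
  | nil => intro k; cases k <;> rfl
  | cons x xs ih =>
    intro k
    match k with
    | 0 => rfl
    | k + 1 => simpa using ih k

-- A's stride sum equals pick 0  (fuel induction on the length)
lemma stride_aux : ∀ (n : Nat) (l : List Int), l.length ≤ n →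
    ((PySem.List.pyRange 0 (l.length : Int) 10).map (fun i => PySem.List.pyGetD l i 0)).sum
      = pick 0 l := by
  intro n
  induction n with
  | zero =>
    intro l hl
    have : l = [] := List.eq_nil_of_length_eq_zero (Nat.le_zero.mp hl)
    subst this
    simp [PySem.List.pyRange_of_pos (0:Int) 0 (by norm_num : (0:Int) < 10), pick]
  | succ n ih =>
    intro l hl
    match l with
    | [] => simp [PySem.List.pyRange_of_pos (0:Int) 0 (by norm_num : (0:Int) < 10), pick]
    | x :: xs =>
      set N : Int := ((x :: xs).length : Int) with hN
      have hNpos : 0 < N := by simp [hN]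
      rw [PySem.List.pyRange_of_pos 0 N (by norm_num : (0:Int) < 10)]
      have hm : (if (0:Int) < N then ((N - 0 + 10 - 1) / 10).toNat else 0) = ((N + 9) / 10).toNat := by
        rw [if_pos hNpos]; ring_nf
      rw [hm, List.map_map]
      obtain ⟨m', hm'⟩ : ∃ m', ((N + 9) / 10).toNat = m' + 1 := by
        have : 1 ≤ (N + 9) / 10 := by omega
        exact ⟨((N + 9) / 10).toNat - 1, by omega⟩
      rw [hm', List.range_succ_eq_map, List.map_cons, List.sum_cons, List.map_map]
      simp only [Function.comp_def]
      have hx : PySem.List.pyGetD (x :: xs) (0 + 10 * ((0 : Nat) : Int)) 0 = x := by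
        norm_num [PySem.List.pyGetD_ofNat']
      rw [hx]
      have hshift : ∀ k : Nat,
          PySem.List.pyGetD (x :: xs) (0 + 10 * ((Nat.succ k : Nat) : Int)) 0
            = PySem.List.pyGetD ((x :: xs).drop 10) ((10 * (k : Int))) 0 := by
        intro k
        have h1 : (0 + 10 * ((Nat.succ k : Nat) : Int)) = ((10 + 10 * k : Nat) : Int) := by push_cast; ring
        have h2 : (10 * (k : Int)) = ((10 * k : Nat) : Int) := by push_cast; ring
        rw [h1, h2, PySem.List.pyGetD_natCast, PySem.List.pyGetD_natCast]
        simp only [List.getD, List.getElem?_drop, List.drop_succ_cons]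
        have h3 : (10 + 10 * k) = (9 + 10 * k) + 1 := by omega
        rw [show (10:Nat) + 10 * k = (9 + 10 * k) + 1 from h3]
        rw [List.getElem?_cons_succ]
      have hmap : (List.range m').map (fun k : Nat => PySem.List.pyGetD (x :: xs) (0 + 10 * ((Nat.succ k : Nat) : Int)) 0)
          = (List.range m').map (fun k : Nat => PySem.List.pyGetD ((x :: xs).drop 10) (0 + 10 * (k : Int)) 0) := by
        apply List.map_congr_left
        intro k _
        simpa using hshift k
      rw [hmap]
      -- identify with the stride sum of the dropped list
      have hdroplen : (((x :: xs).drop 10).length : Int) = if N ≤ 10 then 0 else N - 10 := by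
        simp only [List.length_drop]
        split_ifs <;> omega
      have hIH := ih ((x :: xs).drop 10) (by simp only [List.length_drop, List.length_cons] at hl ⊢; omega)
      rw [PySem.List.pyRange_of_pos 0 _ (by norm_num : (0:Int) < 10)] at hIH
      have hm2 : (if (0:Int) < (((x :: xs).drop 10).length : Int) then (((((x :: xs).drop 10).length : Int) - 0 + 10 - 1) / 10).toNat else 0) = m' := by
        rw [hdroplen]; split_ifs <;> omega
      rw [hm2, List.map_map] at hIH
      simp only [Function.comp_def] at hIH
      rw [hIH]
      have : pick 0 (x :: xs) = x + pick 0 ((x :: xs).drop 10) := by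
        show x + pick 9 xs = _
        rw [pick_eq_drop xs 9]
        rfl
      rw [this]

-- the concatenated runs of the count list, each bucket value replicated its count
def runs : Int → List Int → List Int
  | _, [] => []
  | v, c :: cs => List.replicate c.toNat v ++ runs (v + 1) cs

lemma runs_eq_enumerate : ∀ (cnt : List Int) (v : Int),
    runs v cnt = (PySem.List.enumerate cnt v).flatMap (fun p => List.replicate p.2.toNat p.1) := by
  intro cnt
  induction cnt with
  | nil => intro v; simp [runs, PySem.List.enumerate_nil]
  | cons c cs ih => intro v; simp [runs, PySem.List.enumerate_cons, ih]

-- B's indexed fold computes pick over the concatenated runs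
lemma bfold_eq_pick (cnt : List Int) : ∀ (sm skip v : Int), 0 ≤ skip → skip < 10 →
    (∀ x ∈ cnt, 0 ≤ x) →
    (cnt.foldl
      (fun (st : Int × Int × Int) c =>
        if c > st.2.1 then
          (st.1 + st.2.2 * (PySem.Int.floordiv (c - st.2.1 - 1) 10 + 1),
           PySem.Int.mod (st.2.1 - c) 10, st.2.2 + 1)
        else (st.1, st.2.1 - c, st.2.2 + 1)) (sm, skip, v)).1
    = sm + pick skip.toNat (runs v cnt) := by
  induction cnt with
  | nil => intro sm skip v _ _ _; simp [runs, pick]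
  | cons c cs ih =>
    intro sm skip v h0 h10 hnn
    have hc : 0 ≤ c := hnn c (by simp)
    rw [List.foldl_cons, runs, pick_replicate]
    by_cases hgt : c > skip
    · rw [if_pos hgt]
      rw [ih _ _ _ (PySem.Int.mod_nonneg _ (by norm_num)) (PySem.Int.mod_lt _ (by norm_num)) (fun q hq => hnn q (by simp [hq]))]
      rw [PySem.Int.mod_eq_emod_of_pos (by norm_num), PySem.Int.floordiv_eq_ediv_of_pos (by norm_num)]
      have h1 : (hits skip.toNat c.toNat : Int) = (c - skip - 1) / 10 + 1 := by
        unfold hits; split_ifs with h <;> push_cast <;> omega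
      have h2 : ((skip - c) % 10).toNat = nskip skip.toNat c.toNat := by
        unfold nskip; split_ifs with h <;> omega
      rw [h1, h2]; ring
    · rw [if_neg hgt]
      rw [ih _ _ _ (by simp; omega) (by simp; omega) (fun q hq => hnn q (by simp [hq]))]
      have h1 : (hits skip.toNat c.toNat : Int) = 0 := by
        have hk : ¬ skip.toNat < c.toNat := by omega
        simp [hits, hk]
      have h2 : (skip - c).toNat = nskip skip.toNat c.toNat := by
        unfold nskip; split_ifs with h <;> omega
      rw [h1, h2]; ring

-- the Array read/write helpers of A, seen through toList, are B's list operations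
lemma pyAGetD_eq_toList (c : Array Int) (i : Int) (d : Int) :
    pyAGetD c i d = PySem.List.pyGetD c.toList i d := by
  simp only [pyAGetD, PySem.List.pyGetD, PySem.List.pyGet?, PySem.List.pyIdx?,
    Array.length_toList]
  by_cases h0 : 0 ≤ i
  · rw [if_neg (by omega : ¬ i < 0), if_pos (by omega : (0:Int) ≤ i), if_pos h0]
    by_cases h1 : i < (c.size : Int)
    · rw [if_pos h1]
      simp [Array.getD_eq_getD_getElem?, Array.getElem?_toList]
    · rw [if_neg h1]
      have : c.size ≤ i.toNat := by omega
      simp [Array.getD_eq_getD_getElem?, Array.getElem?_eq_none this]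
  · rw [if_pos (by omega : i < 0), if_neg h0]
    by_cases h2 : 0 ≤ i + (c.size : Int)
    · rw [if_pos h2, if_pos (by omega : -(c.size : Int) ≤ i)]
      have hidx : (i + (c.size : Int)).toNat = c.size - (-i).toNat := by omega
      simp [hidx, Array.getD_eq_getD_getElem?, Array.getElem?_toList]
    · rw [if_neg h2, if_neg (by omega : ¬ -(c.size : Int) ≤ i)]
      simp

lemma pyAIncr_toList (c : Array Int) (i : Int) :
    (pyAIncr c i).toList = pyListIncr c.toList i := by
  simp only [pyAIncr, pyListIncr, Array.toList_setIfInBounds, Array.length_toList,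
    pyAGetD_eq_toList]

-- a fold over a flatMap is the nested fold (shape of B's counting loops)
lemma foldl_flatMap_eq {α β γ : Type} (l : List α) (g : α → List β)
    (f : γ → β → γ) : ∀ (init : γ),
    (l.flatMap g).foldl f init = l.foldl (fun acc x => (g x).foldl f acc) init := by
  induction l with
  | nil => intro init; rfl
  | cons a l ih => intro init; rw [List.flatMap_cons, List.foldl_append, List.foldl_cons, ih]

-- A's counting fold, seen through toList, is B's nested counting fold
lemma counts_eq (arr_a arr_b : List Int) :
    ((arr_a.flatMap (fun i => arr_b.map (fun j => i * j))).foldl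
        (fun c i => pyAIncr c i) (Array.replicate 40001 (0 : Int))).toList
      = arr_a.foldl (fun c i => arr_b.foldl (fun c' j => pyListIncr c' (i * j)) c)
          (List.replicate 40001 (0 : Int)) := by
  have htl : ∀ (xs : List Int) (a0 : Array Int),
      (xs.foldl (fun c i => pyAIncr c i) a0).toList
        = xs.foldl (fun c i => pyListIncr c i) a0.toList := by
    intro xs
    induction xs with
    | nil => intro a0; rfl
    | cons a xs ih => intro a0; rw [List.foldl_cons, List.foldl_cons, ih, pyAIncr_toList]
  rw [htl, Array.toList_replicate, foldl_flatMap_eq]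
  simp only [List.foldl_map]

-- values read by pyGetD from an elementwise-nonnegative list are nonnegative
lemma pyGetD_nonneg (c : List Int) (i : Int) (h : ∀ x ∈ c, 0 ≤ x) :
    0 ≤ PySem.List.pyGetD c i 0 := by
  cases hg : PySem.List.pyGet? c i with
  | none => simp [PySem.List.pyGetD, hg]
  | some w =>
    have hw : w ∈ c := by
      simp only [PySem.List.pyGet?] at hg
      rcases Option.bind_eq_some_iff.mp hg with ⟨k, _, hk2⟩
      exact List.mem_of_getElem? hk2
    simpa [PySem.List.pyGetD, hg] using h w hw

lemma pyListIncr_nonneg (c : List Int) (i : Int) (h : ∀ x ∈ c, 0 ≤ x) :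
    ∀ x ∈ pyListIncr c i, 0 ≤ x := by
  intro x hx
  simp only [pyListIncr] at hx
  rcases List.mem_or_eq_of_mem_set hx with hx' | rfl
  · exact h x hx'
  · have := pyGetD_nonneg c i h
    omega

-- the count list stays elementwise nonnegative through B's counting loops
lemma cnt_nonneg (arr_a arr_b : List Int) : ∀ x ∈
    arr_a.foldl (fun c i => arr_b.foldl (fun c' j => pyListIncr c' (i * j)) c)
      (List.replicate 40001 (0 : Int)), 0 ≤ x := by
  have gen : ∀ (xs : List Int) (c0 : List Int), (∀ x ∈ c0, 0 ≤ x) →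
      ∀ x ∈ xs.foldl (fun c i => arr_b.foldl (fun c' j => pyListIncr c' (i * j)) c) c0, 0 ≤ x := by
    intro xs
    induction xs with
    | nil => intro c0 h0; exact h0
    | cons a xs ih =>
      intro c0 h0
      apply ih
      have inner : ∀ (ys : List Int) (c0 : List Int), (∀ x ∈ c0, 0 ≤ x) →
          ∀ x ∈ ys.foldl (fun c' j => pyListIncr c' (a * j)) c0, 0 ≤ x := by
        intro ys
        induction ys with
        | nil => intro c0 h0; exact h0
        | cons b ys ihy => intro c0 h0; exact ihy _ (pyListIncr_nonneg c0 (a * b) h0)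
      exact inner arr_b c0 h0
  apply gen
  intro x hx
  rw [List.eq_of_mem_replicate hx]

-- A's second phase on the Array count equals B's indexed pass over the list count
lemma phase2A_eq (cntA : Array Int) (cnt : List Int) (hL : cntA.toList = cnt)
    (hnn : ∀ x ∈ cnt, 0 ≤ x) :
    (let sorted_arr :=
      (PySem.List.pyRange 0 (cntA.size : Int) 1).foldl
        (fun acc i =>
          if pyAGetD cntA i 0 ≠ 0 then
            acc ++ List.replicate (pyAGetD cntA i 0).toNat i
          else acc) [];
     ((PySem.List.pyRange 0 (sorted_arr.length : Int) 10).map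
        (fun i => PySem.List.pyGetD sorted_arr i 0)).sum)
    = (cnt.foldl
        (fun (st : Int × Int × Int) c =>
          if c > st.2.1 then
            (st.1 + st.2.2 * (PySem.Int.floordiv (c - st.2.1 - 1) 10 + 1),
             PySem.Int.mod (st.2.1 - c) 10, st.2.2 + 1)
          else (st.1, st.2.1 - c, st.2.2 + 1)) ((0 : Int), (0 : Int), (0 : Int))).1 := by
  have hsz : (cntA.size : Int) = (cnt.length : Int) := by
    rw [← hL, Array.length_toList]
  simp only [pyAGetD_eq_toList, hL, hsz]
  -- A's built list is a flat map of replicated runs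
  have hstep : (fun (acc : List Int) (i : Int) =>
        if PySem.List.pyGetD cnt i 0 ≠ 0 then
          acc ++ List.replicate (PySem.List.pyGetD cnt i 0).toNat i
        else acc)
      = (fun acc i => acc ++ List.replicate (PySem.List.pyGetD cnt i 0).toNat i) := by
    funext acc i
    by_cases h : PySem.List.pyGetD cnt i 0 = 0
    · simp [h]
    · simp [h]
  rw [hstep, PySem.List.foldl_append_eq_flatMap, List.nil_append]
  -- B's indexed pass is pick over the runs, which are A's flat map
  rw [bfold_eq_pick cnt 0 0 0 le_rfl (by norm_num) hnn]
  rw [runs_eq_enumerate, PySem.List.enumerate_eq_map_pyRange (d := 0), List.flatMap_map]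
  simp only [Int.toNat_zero, zero_add, PySem.List.len_eq]
  exact stride_aux _ _ le_rfl

-- ===== VERDICT (by name: the statement is the Claim_ definition above) =====
theorem sort_integer_nums_spec : Claim_equal_sort_integer_nums := by
  intro arr_a arr_b _ _
  unfold Spec_sort_integer_nums sort_integer_nums sort_integer_nums_alt
  exact phase2A_eq _ _ (counts_eq arr_a arr_b) (cnt_nonneg arr_a arr_b)
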